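-- pv_equiv track=rewrite | github.com/githubsongminseo/OSS | oss_2025.py | classify_risk_levels
-- ===== SOURCE A (Python) =====
-- from collections import Counter
--
-- def classify_risk_levels(
--     hypertension_risk_ids: list,
--     obesity_risk_ids: list,
--     glucose_risk_ids: list,
--     diabetes_risk_ids: list,
--     tg_risk_ids: list,
--     cholesterol_risk_ids: list
-- ) -> dict:
--     """
--     주어진 6가지 질병 위험군 ID 리스트를 기반으로 각 ID의 위험도를 6단계로 분류합니다.
--     """
--     all_risk_ids = (
--         hypertension_risk_ids +
--         obesity_risk_ids +
--         glucose_risk_ids +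
--         diabetes_risk_ids +
--         tg_risk_ids +
--         cholesterol_risk_ids
--     )
--
--     id_risk_counts = Counter(all_risk_ids)
--
--     classified_risks = {
--         '초고도 위험군': [],  # 6개 포함
--         '고도 위험군': [],    # 5개 포함
--         '상당 위험군': [],   # 4개 포함
--         '중등도 위험군': [], # 3개 포함
--         '주의필요': [],      # 2개 포함
--         '관심요망': []       # 1개 포함
--     }
--
--     for individual_id, count in id_risk_counts.items():
--         if count == 6:
--             classified_risks['초고도 위험군'].append(individual_id)
--         elif count == 5:
--             classified_risks['고도 위험군'].append(individual_id)
--         elif count == 4: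
--             classified_risks['상당 위험군'].append(individual_id)
--         elif count == 3:
--             classified_risks['중등도 위험군'].append(individual_id)
--         elif count == 2:
--             classified_risks['주의필요'].append(individual_id)
--         elif count == 1:
--             classified_risks['관심요망'].append(individual_id)
--
--     for risk_level in classified_risks:
--         classified_risks[risk_level].sort()
--
--     return classified_risks
-- ===== SOURCE B (Python) =====
-- def classify_risk_levels(
--     hypertension_risk_ids: list,
--     obesity_risk_ids: list,
--     glucose_risk_ids: list,
--     diabetes_risk_ids: list,
--     tg_risk_ids: list,
--     cholesterol_risk_ids: list
-- ) -> dict: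
--     # Sort the concatenation once and scan it: each maximal run of equal ids has
--     # length = that id's risk count, so no counting dictionary is needed and the
--     # buckets come out sorted by construction (runs appear in increasing id order).
--     LEVELS = ('관심요망', '주의필요', '중등도 위험군', '상당 위험군', '고도 위험군', '초고도 위험군')
--     result = {
--         '초고도 위험군': [],
--         '고도 위험군': [],
--         '상당 위험군': [],
--         '중등도 위험군': [],
--         '주의필요': [],
--         '관심요망': []
--     }
--
--     def emit(value, run):
--         if run <= 6:
--             result[LEVELS[run - 1]].append(value)
--
--     ordered = sorted(
--         hypertension_risk_ids + obesity_risk_ids + glucose_risk_ids +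
--         diabetes_risk_ids + tg_risk_ids + cholesterol_risk_ids
--     )
--     if ordered:
--         cur, run = ordered[0], 1
--         for x in ordered[1:]:
--             if x == cur:
--                 run += 1
--             else:
--                 emit(cur, run)
--                 cur, run = x, 1
--         emit(cur, run)
--     return result
-- ===== Notes on version B (the rewrite author's own statement) =====
-- stated objective: alternative
-- what changed: B drops the Counter entirely: it sorts the concatenated list once and scans it, emitting each maximal run of equal ids into the bucket indexed by the run length, so counts come from adjacency in the sorted list and the buckets are sorted by construction (no counting dict, no per-bucket sort passes).
import Mathlib
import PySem

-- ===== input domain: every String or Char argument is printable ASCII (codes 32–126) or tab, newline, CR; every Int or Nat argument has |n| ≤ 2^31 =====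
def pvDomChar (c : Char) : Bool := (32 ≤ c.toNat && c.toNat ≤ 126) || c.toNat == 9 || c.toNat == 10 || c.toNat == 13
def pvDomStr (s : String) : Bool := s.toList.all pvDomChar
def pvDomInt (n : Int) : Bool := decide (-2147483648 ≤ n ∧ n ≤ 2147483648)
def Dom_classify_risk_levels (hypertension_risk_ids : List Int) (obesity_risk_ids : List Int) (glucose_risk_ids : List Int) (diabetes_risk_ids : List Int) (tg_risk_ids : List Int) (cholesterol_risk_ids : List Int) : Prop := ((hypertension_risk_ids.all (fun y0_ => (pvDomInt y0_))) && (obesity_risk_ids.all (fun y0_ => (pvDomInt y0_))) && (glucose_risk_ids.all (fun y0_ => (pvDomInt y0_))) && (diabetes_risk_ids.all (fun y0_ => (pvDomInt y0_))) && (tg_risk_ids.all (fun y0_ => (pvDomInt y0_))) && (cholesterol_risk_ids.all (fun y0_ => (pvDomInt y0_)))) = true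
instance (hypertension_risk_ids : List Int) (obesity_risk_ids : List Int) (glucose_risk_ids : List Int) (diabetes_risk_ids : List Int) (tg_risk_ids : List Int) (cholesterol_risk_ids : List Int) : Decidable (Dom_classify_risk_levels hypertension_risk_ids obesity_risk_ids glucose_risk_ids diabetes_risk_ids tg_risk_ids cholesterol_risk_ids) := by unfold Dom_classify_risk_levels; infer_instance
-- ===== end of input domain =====

-- B drops the Counter: it sorts the concatenation once and scans it, emitting each maximal
-- run of equal ids into the bucket indexed by the run length (objective: alternative algorithm;
-- same result, buckets sorted by construction).


-- ===== PORT A =====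
-- the body of A's for-loop over id_risk_counts.items() (the if/elif cascade), lambda-lifted
def pvStepA (cr : PySem.Dict String (List Int)) (p : Int × Int) : PySem.Dict String (List Int) :=
  if p.2 = 6 then cr.modify "초고도 위험군" [] (fun l => l ++ [p.1])
  else if p.2 = 5 then cr.modify "고도 위험군" [] (fun l => l ++ [p.1])
  else if p.2 = 4 then cr.modify "상당 위험군" [] (fun l => l ++ [p.1])
  else if p.2 = 3 then cr.modify "중등도 위험군" [] (fun l => l ++ [p.1])
  else if p.2 = 2 then cr.modify "주의필요" [] (fun l => l ++ [p.1])
  else if p.2 = 1 then cr.modify "관심요망" [] (fun l => l ++ [p.1])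
  else cr

-- the body of A's final loop: classified_risks[risk_level].sort()
def pvSortStepA (cr : PySem.Dict String (List Int)) (k : String) : PySem.Dict String (List Int) :=
  cr.modify k [] (fun l => PySem.List.sorted l (fun x => x))

def classify_risk_levels (hypertension_risk_ids : List Int) (obesity_risk_ids : List Int) (glucose_risk_ids : List Int) (diabetes_risk_ids : List Int) (tg_risk_ids : List Int) (cholesterol_risk_ids : List Int) : List (String × List Int) :=
  let all_risk_ids := hypertension_risk_ids ++ obesity_risk_ids ++ glucose_risk_ids ++ diabetes_risk_ids ++ tg_risk_ids ++ cholesterol_risk_ids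
  let id_risk_counts := PySem.Dict.counter all_risk_ids
  let classified_risks : PySem.Dict String (List Int) :=
    PySem.Dict.ofList [("초고도 위험군", []), ("고도 위험군", []), ("상당 위험군", []), ("중등도 위험군", []), ("주의필요", []), ("관심요망", [])]
  let classified_risks := id_risk_counts.items.foldl pvStepA classified_risks
  let classified_risks := classified_risks.keys.foldl pvSortStepA classified_risks
  classified_risks.items

-- ===== PORT B =====
-- LEVELS: level name for a run of length n (= risk count n) is pvLevels[n - 1]
def pvLevels : List String := ["관심요망", "주의필요", "중등도 위험군", "상당 위험군", "고도 위험군", "초고도 위험군"]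

-- B's emit(value, run): run ≤ 6 guard, bucket indexed by run length.
-- (getD with "" is exact here: emit is only ever called with 1 ≤ run, where LEVELS[run-1] is in range.)
def pvEmit (res : PySem.Dict String (List Int)) (value : Int) (run : Nat) : PySem.Dict String (List Int) :=
  if run ≤ 6 then res.modify (pvLevels.getD (run - 1) "") [] (fun l => l ++ [value]) else res

-- B's for-loop over ordered[1:] with the (cur, run) accumulator, plus the trailing emit
def pvScanB (res : PySem.Dict String (List Int)) (cur : Int) (run : Nat) : List Int → PySem.Dict String (List Int)
  | [] => pvEmit res cur run
  | x :: xs => if x = cur then pvScanB res cur (run + 1) xs else pvScanB (pvEmit res cur run) x 1 xs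

def classify_risk_levels_alt (hypertension_risk_ids : List Int) (obesity_risk_ids : List Int) (glucose_risk_ids : List Int) (diabetes_risk_ids : List Int) (tg_risk_ids : List Int) (cholesterol_risk_ids : List Int) : List (String × List Int) :=
  let result : PySem.Dict String (List Int) :=
    PySem.Dict.ofList [("초고도 위험군", []), ("고도 위험군", []), ("상당 위험군", []), ("중등도 위험군", []), ("주의필요", []), ("관심요망", [])]
  let ordered := PySem.List.sorted (hypertension_risk_ids ++ obesity_risk_ids ++ glucose_risk_ids ++ diabetes_risk_ids ++ tg_risk_ids ++ cholesterol_risk_ids) (fun x => x)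
  match ordered with
  | [] => result.items
  | x :: xs => (pvScanB result x 1 xs).items

-- ===== PRECONDITION & SPEC =====
def Spec_classify_risk_levels (hypertension_risk_ids : List Int) (obesity_risk_ids : List Int) (glucose_risk_ids : List Int) (diabetes_risk_ids : List Int) (tg_risk_ids : List Int) (cholesterol_risk_ids : List Int) (out : List (String × List Int)) : Prop := out = classify_risk_levels_alt hypertension_risk_ids obesity_risk_ids glucose_risk_ids diabetes_risk_ids tg_risk_ids cholesterol_risk_ids
instance (hypertension_risk_ids : List Int) (obesity_risk_ids : List Int) (glucose_risk_ids : List Int) (diabetes_risk_ids : List Int) (tg_risk_ids : List Int) (cholesterol_risk_ids : List Int) (out : List (String × List Int)) : Decidable (Spec_classify_risk_levels hypertension_risk_ids obesity_risk_ids glucose_risk_ids diabetes_risk_ids tg_risk_ids cholesterol_risk_ids out) := by unfold Spec_classify_risk_levels; infer_instance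

-- ===== CLAIM (what is proved, stated in full; the proofs are below) =====
def Claim_equal_classify_risk_levels : Prop := ∀ (hypertension_risk_ids : List Int) (obesity_risk_ids : List Int) (glucose_risk_ids : List Int) (diabetes_risk_ids : List Int) (tg_risk_ids : List Int) (cholesterol_risk_ids : List Int), Dom_classify_risk_levels hypertension_risk_ids obesity_risk_ids glucose_risk_ids diabetes_risk_ids tg_risk_ids cholesterol_risk_ids → Spec_classify_risk_levels hypertension_risk_ids obesity_risk_ids glucose_risk_ids diabetes_risk_ids tg_risk_ids cholesterol_risk_ids (classify_risk_levels hypertension_risk_ids obesity_risk_ids glucose_risk_ids diabetes_risk_ids tg_risk_ids cholesterol_risk_ids)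

-- ===== LEMMAS AND PROOFS =====

-- A's first loop, on an arbitrary items list and arbitrary current bucket contents
theorem pvFoldA_spec (l : List (Int × Int)) (v6 v5 v4 v3 v2 v1 : List Int) :
    l.foldl pvStepA (PySem.Dict.mk [("초고도 위험군", v6), ("고도 위험군", v5), ("상당 위험군", v4), ("중등도 위험군", v3), ("주의필요", v2), ("관심요망", v1)]) =
    PySem.Dict.mk [("초고도 위험군", v6 ++ (l.filter (fun p => p.2 == 6)).map Prod.fst),
                   ("고도 위험군", v5 ++ (l.filter (fun p => p.2 == 5)).map Prod.fst),
                   ("상당 위험군", v4 ++ (l.filter (fun p => p.2 == 4)).map Prod.fst),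
                   ("중등도 위험군", v3 ++ (l.filter (fun p => p.2 == 3)).map Prod.fst),
                   ("주의필요", v2 ++ (l.filter (fun p => p.2 == 2)).map Prod.fst),
                   ("관심요망", v1 ++ (l.filter (fun p => p.2 == 1)).map Prod.fst)] := by
  induction l generalizing v6 v5 v4 v3 v2 v1 with
  | nil => simp
  | cons p l ih =>
    by_cases h6 : p.2 = 6
    · simp only [List.foldl_cons, pvStepA, h6, PySem.Dict.modify, PySem.Dict.insert, PySem.Dict.getD, PySem.Dict.get?, PySem.Dict.contains]
      simp [ih, h6]
    by_cases h5 : p.2 = 5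
    · simp only [List.foldl_cons, pvStepA, h5, PySem.Dict.modify, PySem.Dict.insert, PySem.Dict.getD, PySem.Dict.get?, PySem.Dict.contains]
      simp [ih, h5]
    by_cases h4 : p.2 = 4
    · simp only [List.foldl_cons, pvStepA, h4, PySem.Dict.modify, PySem.Dict.insert, PySem.Dict.getD, PySem.Dict.get?, PySem.Dict.contains]
      simp [ih, h4]
    by_cases h3 : p.2 = 3
    · simp only [List.foldl_cons, pvStepA, h3, PySem.Dict.modify, PySem.Dict.insert, PySem.Dict.getD, PySem.Dict.get?, PySem.Dict.contains]
      simp [ih, h3]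
    by_cases h2 : p.2 = 2
    · simp only [List.foldl_cons, pvStepA, h2, PySem.Dict.modify, PySem.Dict.insert, PySem.Dict.getD, PySem.Dict.get?, PySem.Dict.contains]
      simp [ih, h2]
    by_cases h1 : p.2 = 1
    · simp only [List.foldl_cons, pvStepA, h1, PySem.Dict.modify, PySem.Dict.insert, PySem.Dict.getD, PySem.Dict.get?, PySem.Dict.contains]
      simp [ih, h1]
    · simp only [List.foldl_cons, pvStepA, h6, h5, h4, h3, h2, h1]
      simp [ih, h6, h5, h4, h3, h2, h1]

-- A's final loop: sorting each of the six buckets in place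
theorem pvSortFoldA_spec (v6 v5 v4 v3 v2 v1 : List Int) :
    (PySem.Dict.mk [("초고도 위험군", v6), ("고도 위험군", v5), ("상당 위험군", v4), ("중등도 위험군", v3), ("주의필요", v2), ("관심요망", v1)]).keys.foldl pvSortStepA
      (PySem.Dict.mk [("초고도 위험군", v6), ("고도 위험군", v5), ("상당 위험군", v4), ("중등도 위험군", v3), ("주의필요", v2), ("관심요망", v1)]) =
    PySem.Dict.mk [("초고도 위험군", PySem.List.sorted v6 (fun x => x)), ("고도 위험군", PySem.List.sorted v5 (fun x => x)), ("상당 위험군", PySem.List.sorted v4 (fun x => x)), ("중등도 위험군", PySem.List.sorted v3 (fun x => x)), ("주의필요", PySem.List.sorted v2 (fun x => x)), ("관심요망", PySem.List.sorted v1 (fun x => x))] := by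
  simp [pvSortStepA, PySem.Dict.keys, PySem.Dict.modify, PySem.Dict.insert, PySem.Dict.getD, PySem.Dict.get?, PySem.Dict.contains]

-- sorting a filtered set of distinct ids = filtering the sorted set (order does not matter)
theorem pvSortedFilter (xs : List Int) (q : Int → Bool) :
    PySem.List.sorted (List.filter q (PySem.Set.ofList xs)) (fun x => x) =
    List.filter q (PySem.List.sorted (PySem.Set.ofList xs) (fun x => x)) := by
  apply PySem.List.sorted_eq_of_perm_of_pairwise_lt
  · exact List.Perm.filter q (PySem.List.sorted_perm _ _ _)
  · exact List.Pairwise.filter q (PySem.List.sorted_ofList_pairwise_lt xs)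


-- set(xs) of a filtered list = the filtered set (first occurrences survive filtering)
theorem pvOfListFilter (xs : List Int) (p : Int → Bool) :
    PySem.Set.ofList (xs.filter p) = (PySem.Set.ofList xs).filter p := by
  induction xs with
  | nil => rfl
  | cons y ys ih =>
    by_cases hp : p y
    · simp only [List.filter_cons, hp, if_pos, PySem.Set.ofList_cons, ih, PySem.Set.discard,
        List.filter_filter]
      refine congrArg (List.cons y) (List.filter_congr ?_)
      intro a _
      exact Bool.and_comm _ _
    · simp only [List.filter_cons, hp, Bool.false_eq_true, if_false, PySem.Set.ofList_cons,
        PySem.Set.discard, List.filter_filter, ih]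
      refine List.filter_congr ?_
      intro a _
      by_cases ha : a = y
      · subst ha; simp [hp]
      · simp [ha]

theorem pvDiscardOfList (xs : List Int) (x : Int) :
    PySem.Set.discard (PySem.Set.ofList xs) x = PySem.Set.ofList (xs.filter (fun y => decide (y ≠ x))) := by
  rw [pvOfListFilter]
  refine List.filter_congr ?_
  intro a _
  by_cases ha : a = x
  · simp [ha]
  · simp [ha]

-- set(xs) keeps xs's relative order, so it inherits any Pairwise relation
theorem pvOfListPairwise {R : Int → Int → Prop} (xs : List Int) (h : xs.Pairwise R) :
    (PySem.Set.ofList xs).Pairwise R := by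
  induction xs with
  | nil => exact List.Pairwise.nil
  | cons y ys ih =>
    rw [PySem.Set.ofList_cons]
    rcases List.pairwise_cons.mp h with ⟨hy, hys⟩
    refine List.pairwise_cons.mpr ⟨?_, List.Pairwise.filter _ (ih hys)⟩
    intro z hz
    have hz' : z ∈ PySem.Set.ofList ys := List.mem_of_mem_filter hz
    exact hy z ((PySem.Set.mem_ofList ys z).mp hz')

-- run decomposition
-- B proof helper: the run decomposition pvScanB walks through, as explicit (value, run-length) pairs
def pvRuns (v : Int) (k : Nat) : List Int → List (Int × Nat)
  | [] => [(v, k)]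
  | x :: xs => if x = v then pvRuns v (k + 1) xs else (v, k) :: pvRuns x 1 xs

theorem pvScanB_eq_foldl_runs (s : List Int) (res : PySem.Dict String (List Int)) (v : Int) (k : Nat) :
    pvScanB res v k s = (pvRuns v k s).foldl (fun r p => pvEmit r p.1 p.2) res := by
  induction s generalizing res v k with
  | nil => simp [pvScanB, pvRuns]
  | cons x xs ih =>
    by_cases h : x = v
    · simp [pvScanB, pvRuns, h, ih]
    · simp [pvScanB, pvRuns, h, ih]

-- every run length produced is positive
theorem pvRuns_pos (s : List Int) (v : Int) (k : Nat) (hk : 1 ≤ k) :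
    ∀ p ∈ pvRuns v k s, 1 ≤ p.2 := by
  induction s generalizing v k with
  | nil => simp [pvRuns, hk]
  | cons x xs ih =>
    intro p hp
    by_cases h : x = v
    · exact ih v (k + 1) (by omega) p (by simpa [pvRuns, h] using hp)
    · simp only [pvRuns, h, if_false, List.mem_cons] at hp
      rcases hp with rfl | hp
      · exact hk
      · exact ih x 1 le_rfl p hp

-- the emit-fold over any list of positive run lengths, on arbitrary bucket contents
theorem pvFoldEmit_spec (ps : List (Int × Nat)) (hpos : ∀ p ∈ ps, 1 ≤ p.2) (v6 v5 v4 v3 v2 v1 : List Int) :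
    ps.foldl (fun r p => pvEmit r p.1 p.2) (PySem.Dict.mk [("초고도 위험군", v6), ("고도 위험군", v5), ("상당 위험군", v4), ("중등도 위험군", v3), ("주의필요", v2), ("관심요망", v1)]) =
    PySem.Dict.mk [("초고도 위험군", v6 ++ (ps.filter (fun p => p.2 == 6)).map Prod.fst),
                   ("고도 위험군", v5 ++ (ps.filter (fun p => p.2 == 5)).map Prod.fst),
                   ("상당 위험군", v4 ++ (ps.filter (fun p => p.2 == 4)).map Prod.fst),
                   ("중등도 위험군", v3 ++ (ps.filter (fun p => p.2 == 3)).map Prod.fst),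
                   ("주의필요", v2 ++ (ps.filter (fun p => p.2 == 2)).map Prod.fst),
                   ("관심요망", v1 ++ (ps.filter (fun p => p.2 == 1)).map Prod.fst)] := by
  induction ps generalizing v6 v5 v4 v3 v2 v1 with
  | nil => simp
  | cons p ps ih =>
    have hp : 1 ≤ p.2 := hpos p (List.mem_cons_self ..)
    have hrest : ∀ q ∈ ps, 1 ≤ q.2 := fun q hq => hpos q (List.mem_cons_of_mem _ hq)
    by_cases h6 : p.2 = 6
    · have hstep : pvEmit (PySem.Dict.mk [("초고도 위험군", v6), ("고도 위험군", v5), ("상당 위험군", v4), ("중등도 위험군", v3), ("주의필요", v2), ("관심요망", v1)]) p.1 p.2 = PySem.Dict.mk [("초고도 위험군", v6 ++ [p.1]), ("고도 위험군", v5), ("상당 위험군", v4), ("중등도 위험군", v3), ("주의필요", v2), ("관심요망", v1)] := by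
        simp only [pvEmit, h6]
        simp [pvLevels, PySem.Dict.modify, PySem.Dict.insert, PySem.Dict.getD, PySem.Dict.get?, PySem.Dict.contains]
      rw [List.foldl_cons, hstep, ih hrest]
      simp [h6]
    by_cases h5 : p.2 = 5
    · have hstep : pvEmit (PySem.Dict.mk [("초고도 위험군", v6), ("고도 위험군", v5), ("상당 위험군", v4), ("중등도 위험군", v3), ("주의필요", v2), ("관심요망", v1)]) p.1 p.2 = PySem.Dict.mk [("초고도 위험군", v6), ("고도 위험군", v5 ++ [p.1]), ("상당 위험군", v4), ("중등도 위험군", v3), ("주의필요", v2), ("관심요망", v1)] := by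
        simp only [pvEmit, h5]
        simp [pvLevels, PySem.Dict.modify, PySem.Dict.insert, PySem.Dict.getD, PySem.Dict.get?, PySem.Dict.contains]
      rw [List.foldl_cons, hstep, ih hrest]
      simp [h5]
    by_cases h4 : p.2 = 4
    · have hstep : pvEmit (PySem.Dict.mk [("초고도 위험군", v6), ("고도 위험군", v5), ("상당 위험군", v4), ("중등도 위험군", v3), ("주의필요", v2), ("관심요망", v1)]) p.1 p.2 = PySem.Dict.mk [("초고도 위험군", v6), ("고도 위험군", v5), ("상당 위험군", v4 ++ [p.1]), ("중등도 위험군", v3), ("주의필요", v2), ("관심요망", v1)] := by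
        simp only [pvEmit, h4]
        simp [pvLevels, PySem.Dict.modify, PySem.Dict.insert, PySem.Dict.getD, PySem.Dict.get?, PySem.Dict.contains]
      rw [List.foldl_cons, hstep, ih hrest]
      simp [h4]
    by_cases h3 : p.2 = 3
    · have hstep : pvEmit (PySem.Dict.mk [("초고도 위험군", v6), ("고도 위험군", v5), ("상당 위험군", v4), ("중등도 위험군", v3), ("주의필요", v2), ("관심요망", v1)]) p.1 p.2 = PySem.Dict.mk [("초고도 위험군", v6), ("고도 위험군", v5), ("상당 위험군", v4), ("중등도 위험군", v3 ++ [p.1]), ("주의필요", v2), ("관심요망", v1)] := by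
        simp only [pvEmit, h3]
        simp [pvLevels, PySem.Dict.modify, PySem.Dict.insert, PySem.Dict.getD, PySem.Dict.get?, PySem.Dict.contains]
      rw [List.foldl_cons, hstep, ih hrest]
      simp [h3]
    by_cases h2 : p.2 = 2
    · have hstep : pvEmit (PySem.Dict.mk [("초고도 위험군", v6), ("고도 위험군", v5), ("상당 위험군", v4), ("중등도 위험군", v3), ("주의필요", v2), ("관심요망", v1)]) p.1 p.2 = PySem.Dict.mk [("초고도 위험군", v6), ("고도 위험군", v5), ("상당 위험군", v4), ("중등도 위험군", v3), ("주의필요", v2 ++ [p.1]), ("관심요망", v1)] := by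
        simp only [pvEmit, h2]
        simp [pvLevels, PySem.Dict.modify, PySem.Dict.insert, PySem.Dict.getD, PySem.Dict.get?, PySem.Dict.contains]
      rw [List.foldl_cons, hstep, ih hrest]
      simp [h2]
    by_cases h1 : p.2 = 1
    · have hstep : pvEmit (PySem.Dict.mk [("초고도 위험군", v6), ("고도 위험군", v5), ("상당 위험군", v4), ("중등도 위험군", v3), ("주의필요", v2), ("관심요망", v1)]) p.1 p.2 = PySem.Dict.mk [("초고도 위험군", v6), ("고도 위험군", v5), ("상당 위험군", v4), ("중등도 위험군", v3), ("주의필요", v2), ("관심요망", v1 ++ [p.1])] := by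
        simp only [pvEmit, h1]
        simp [pvLevels, PySem.Dict.modify, PySem.Dict.insert, PySem.Dict.getD, PySem.Dict.get?, PySem.Dict.contains]
      rw [List.foldl_cons, hstep, ih hrest]
      simp [h1]
    · have hgt : ¬ p.2 ≤ 6 := by omega
      have hstep : pvEmit (PySem.Dict.mk [("초고도 위험군", v6), ("고도 위험군", v5), ("상당 위험군", v4), ("중등도 위험군", v3), ("주의필요", v2), ("관심요망", v1)]) p.1 p.2 = PySem.Dict.mk [("초고도 위험군", v6), ("고도 위험군", v5), ("상당 위험군", v4), ("중등도 위험군", v3), ("주의필요", v2), ("관심요망", v1)] := by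
        simp [pvEmit, hgt]
      rw [List.foldl_cons, hstep, ih hrest]
      simp [h6, h5, h4, h3, h2, h1]

-- run decomposition of a sorted remainder: head value's total count, then the remaining
-- distinct values (in first-occurrence = sorted order) with their counts
theorem pvRuns_spec (s : List Int) (v : Int) (k : Nat)
    (hs : s.Pairwise (· ≤ ·)) (hv : ∀ x ∈ s, v ≤ x) :
    pvRuns v k s = (v, k + s.count v) ::
      (PySem.Set.ofList (s.filter (fun y => y ≠ v))).map (fun w => (w, s.count w)) := by
  induction s generalizing v k with
  | nil => simp [pvRuns]
  | cons x xs ih =>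
    have hxxs : ∀ y ∈ xs, x ≤ y := (List.pairwise_cons.mp hs).1
    have hxs : xs.Pairwise (· ≤ ·) := (List.pairwise_cons.mp hs).2
    by_cases h : x = v
    · subst h
      have hrec := ih x (k + 1) hxs hxxs
      have hfe : (x :: xs).filter (fun y => decide (y ≠ x)) = xs.filter (fun y => decide (y ≠ x)) := by
        simp
      rw [show pvRuns x k (x :: xs) = if x = x then pvRuns x (k + 1) xs else (x, k) :: pvRuns x 1 xs from rfl,
        if_pos rfl, hrec, hfe]
      refine congrArg₂ List.cons ?_ ?_
      · have : List.count x (x :: xs) = List.count x xs + 1 := by simp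
        rw [this]
        exact congrArg (Prod.mk x) (by omega)
      · refine List.map_congr_left ?_
        intro w hw
        have hwne : w ≠ x := by
          have hm := (PySem.Set.mem_ofList _ w).mp hw
          simpa using (List.mem_filter.mp hm).2
        simp [Ne.symm hwne]
    · -- v < x, and v is below everything, so v does not occur in x :: xs
      have hvx : v < x := lt_of_le_of_ne (hv x (List.mem_cons_self ..)) (fun he => h he.symm)
      have hvnot : ∀ y ∈ x :: xs, v < y := by
        intro y hy
        rcases List.mem_cons.mp hy with rfl | hy
        · exact hvx
        · exact lt_of_lt_of_le hvx (hxxs y hy)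
      have hcount0 : (x :: xs).count v = 0 := by
        rw [List.count_eq_zero]
        intro hmem
        exact absurd rfl (ne_of_gt (hvnot v hmem))
      have hfilter : (x :: xs).filter (fun y => decide (y ≠ v)) = x :: xs := by
        rw [List.filter_eq_self]
        intro y hy
        simpa using ne_of_gt (hvnot y hy)
      have ihx := ih x 1 hxs hxxs
      rw [show pvRuns v k (x :: xs) = if x = v then pvRuns v (k + 1) xs else (v, k) :: pvRuns x 1 xs from rfl,
        if_neg h, ihx, hfilter, hcount0, Nat.add_zero, PySem.Set.ofList_cons, pvDiscardOfList,
        List.map_cons]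
      refine congrArg (List.cons (v, k)) (congrArg₂ List.cons ?_ ?_)
      · have : List.count x (x :: xs) = List.count x xs + 1 := by simp
        rw [this]
        exact congrArg (Prod.mk x) (by omega)
      · refine List.map_congr_left ?_
        intro w hw
        have hwne : w ≠ x := by
          have hm := (PySem.Set.mem_ofList _ w).mp hw
          simpa using (List.mem_filter.mp hm).2
        simp [Ne.symm hwne]

theorem classify_risk_levels_spec : Claim_equal_classify_risk_levels := by
  intro h o g d t c _
  unfold Spec_classify_risk_levels classify_risk_levels classify_risk_levels_alt
  have hof : (PySem.Dict.ofList [("초고도 위험군", []), ("고도 위험군", []), ("상당 위험군", []), ("중등도 위험군", []), ("주의필요", []), ("관심요망", [])] : PySem.Dict String (List Int)) =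
      PySem.Dict.mk [("초고도 위험군", ([] : List Int)), ("고도 위험군", ([] : List Int)), ("상당 위험군", ([] : List Int)), ("중등도 위험군", ([] : List Int)), ("주의필요", ([] : List Int)), ("관심요망", ([] : List Int))] := by decide
  set all := h ++ o ++ g ++ d ++ t ++ c with hall
  rcases hsrt : PySem.List.sorted all (fun x => x) with _ | ⟨x, xs⟩
  · -- empty input: every bucket is empty on both sides
    have hnil : all = [] := (PySem.List.sorted_eq_nil_iff all (fun x => x) false).mp hsrt
    rw [hnil, hof]
    decide
  · -- main case: the sorted concatenation is x :: xs
    dsimp only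
    have hperm : (x :: xs).Perm all := by rw [← hsrt]; exact PySem.List.sorted_perm all (fun x => x) false
    have hpair : (x :: xs).Pairwise (fun a b => a ≤ b) := by
      rw [← hsrt]; exact PySem.List.sorted_pairwise all (fun x => x)
    have hxxs : ∀ y ∈ xs, x ≤ y := (List.pairwise_cons.mp hpair).1
    have hxs : xs.Pairwise (· ≤ ·) := (List.pairwise_cons.mp hpair).2
    have hpos := pvRuns_pos xs x 1 le_rfl
    rw [pvScanB_eq_foldl_runs]
    rw [pvRuns_spec xs x 1 hxs hxxs] at hpos ⊢
    -- rewrite the run list as a map over the sorted distinct ids with their total counts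
    have hruns : ((x, 1 + xs.count x) ::
          (PySem.Set.ofList (xs.filter (fun y => y ≠ x))).map (fun w => (w, xs.count w)))
        = (x :: PySem.Set.ofList (xs.filter (fun y => y ≠ x))).map (fun w => (w, (x :: xs).count w)) := by
      rw [List.map_cons]
      refine congrArg₂ List.cons ?_ ?_
      · simp; omega
      · refine List.map_congr_left ?_
        intro w hw
        have hwx : w ≠ x := by
          have := (PySem.Set.mem_ofList _ w).mp hw
          simpa using (List.mem_filter.mp this).2
        simp [Ne.symm hwx]
    rw [hruns] at hpos ⊢
    rw [hof, pvFoldEmit_spec _ hpos]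
    -- the sorted distinct ids of all are exactly x :: set(filtered tail)
    have hL : PySem.List.sorted (PySem.Set.ofList all) (fun x => x) = x :: PySem.Set.ofList (xs.filter (fun y => y ≠ x)) := by
      apply PySem.List.sorted_eq_of_perm_of_pairwise_lt
      · refine (List.perm_ext_iff_of_nodup ?_ ?_).mpr ?_
        · refine List.nodup_cons.mpr ⟨?_, PySem.Set.nodup_ofList _⟩
          intro hx
          have := (PySem.Set.mem_ofList _ x).mp hx
          simpa using (List.mem_filter.mp this).2
        · exact PySem.Set.nodup_ofList all
        · intro a
          rw [PySem.Set.mem_ofList]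
          constructor
          · intro ha
            rcases List.mem_cons.mp ha with rfl | ha
            · exact hperm.mem_iff.mp (List.mem_cons_self ..)
            · have := (PySem.Set.mem_ofList _ a).mp ha
              exact hperm.mem_iff.mp (List.mem_cons_of_mem _ (List.mem_of_mem_filter this))
          · intro ha
            rcases List.mem_cons.mp (hperm.mem_iff.mpr ha) with rfl | ha
            · exact List.mem_cons_self ..
            · by_cases hax : a = x
              · exact hax ▸ List.mem_cons_self ..
              · refine List.mem_cons_of_mem _ ((PySem.Set.mem_ofList _ a).mpr ?_)
                exact List.mem_filter.mpr ⟨ha, by simpa using hax⟩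
      · refine List.pairwise_cons.mpr ⟨?_, ?_⟩
        · intro w hw
          have hmem := (PySem.Set.mem_ofList _ w).mp hw
          have hwx : w ≠ x := by simpa using (List.mem_filter.mp hmem).2
          exact lt_of_le_of_ne (hxxs w (List.mem_of_mem_filter hmem)) (Ne.symm hwx)
        · have hfp : (xs.filter (fun y => decide (y ≠ x))).Pairwise (fun a b => a ≤ b) :=
            List.Pairwise.filter _ hxs
          have hple := pvOfListPairwise _ hfp
          have hnd := PySem.Set.nodup_ofList (xs.filter (fun y => decide (y ≠ x)))
          exact (hple.and hnd).imp (fun hab => lt_of_le_of_ne hab.1 hab.2)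
    -- finish: both sides are the same six filtered buckets of the sorted distinct ids
    have hcnt : ∀ i, all.count i = (x :: xs).count i := fun i => (hperm.count_eq i).symm
    simp only [PySem.Dict.items_counter, List.filter_map, List.map_map, pvFoldA_spec,
      pvSortFoldA_spec, List.nil_append]
    simp only [Function.comp_def, List.map_id', pvSortedFilter, hL]
    refine congrArg PySem.Dict.items (congrArg PySem.Dict.mk ?_)
    have hbkt : ∀ (k : Nat),
        (x :: PySem.Set.ofList (xs.filter (fun y => y ≠ x))).filter
            (fun i => ((all.count i : Int) == (k : Int))) =
        (x :: PySem.Set.ofList (xs.filter (fun y => y ≠ x))).filter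
            (fun w => ((x :: xs).count w == k)) := by
      intro k
      refine List.filter_congr ?_
      intro i _
      rw [hcnt i]
      by_cases hk : (x :: xs).count i = k
      · simp [hk]
      · simp [hk]
    have h6 := hbkt 6
    have h5 := hbkt 5
    have h4 := hbkt 4
    have h3 := hbkt 3
    have h2 := hbkt 2
    have h1 := hbkt 1
    push_cast at h6 h5 h4 h3 h2 h1
    simp only [h6, h5, h4, h3, h2, h1]
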